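-- pv_equiv track=rewrite | github.com/Yawn-Sean/Daily_CF_Problems | daily_problems/2024/12/1220/personal_submission/cf297b_liryc.py | solve
-- ===== SOURCE A (Python) =====
-- def solve(n, m, k, a, b):
--     if len(a) > len(b):
--         return True
--     a.sort()
--     b.sort()
--     j = 0
--     for x in a:
--         while j < m and b[j] < x:
--             j += 1
--         if j == m:
--             return True
--         else:
--             j += 1
--     return False
-- ===== SOURCE B (Python) =====
-- def solve(n, m, k, a, b):
--     # Same return value as the greedy two-pointer original on its domain;
--     # sorts a and b in place like the original.
--     t = len(a)
--     if t > len(b):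
--         return True
--     a.sort()
--     b.sort()
--     if t > m:
--         return True
--     c = min(m, len(b))
--     return any(a[i] > b[c - t + i] for i in range(t))
-- ===== Notes on version B (the rewrite author's own statement) =====
-- stated objective: alternative
-- what changed: Replaces the greedy two-pointer consumption of b by sorting both lists and directly comparing sorted a against the aligned suffix of the top min(m, len(b)) elements of sorted b; Pre_ restricts to the natural domain m >= 0 when len(a) <= len(b) (a negative element cap is malformed input, where A returns False and B returns True) and excludes the inputs with len(a) <= len(b) < m on which A raises IndexError.
-- outside the precondition, e.g. on solve(0, -1, 0, [1], [1]): A returns False, B returns True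
import Mathlib
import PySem

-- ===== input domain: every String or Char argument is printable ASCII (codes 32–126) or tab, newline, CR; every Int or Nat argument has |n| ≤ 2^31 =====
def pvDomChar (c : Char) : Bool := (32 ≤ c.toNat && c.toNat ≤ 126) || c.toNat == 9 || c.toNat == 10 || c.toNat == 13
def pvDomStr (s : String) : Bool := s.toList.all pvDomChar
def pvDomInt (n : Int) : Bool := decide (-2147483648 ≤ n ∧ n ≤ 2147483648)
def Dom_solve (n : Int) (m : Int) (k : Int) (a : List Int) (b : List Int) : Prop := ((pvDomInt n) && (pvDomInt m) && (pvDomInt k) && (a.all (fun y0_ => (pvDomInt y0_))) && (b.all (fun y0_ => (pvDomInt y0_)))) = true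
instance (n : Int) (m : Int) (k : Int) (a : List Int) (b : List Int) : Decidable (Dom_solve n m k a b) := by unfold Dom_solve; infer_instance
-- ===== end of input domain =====

-- B replaces A's greedy two-pointer scan by a direct sorted-suffix comparison (same cost, different
-- algorithm); both sort a and b in place in Python — the equivalence proved here is about the return value.

-- ===== PORT A =====
-- the 'while j < m and b[j] < x' loop; none = IndexError on b[j]
def solveWhile (b : List Int) (m : Int) (x : Int) (j : Int) : Option Int :=
  if h : j < m then
    match PySem.List.pyGet? b j with
    | none => none
    | some v => if v < x then solveWhile b m x (j + 1) else some j
  else some j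
termination_by (m - j).toNat
decreasing_by omega

-- the 'for x in a' loop with pointer j; none = IndexError propagated
def solveLoop (b : List Int) (m : Int) : List Int → Int → Option Bool
  | [], _ => some false
  | x :: rest, j =>
    match solveWhile b m x j with
    | none => none
    | some j' => if j' = m then some true else solveLoop b m rest (j' + 1)

def solve (n : Int) (m : Int) (k : Int) (a : List Int) (b : List Int) : Bool :=
  if a.length > b.length then true
  else
    -- .getD true totalizes the IndexError case; Pre_solve excludes it
    (solveLoop (PySem.List.sorted b (fun x => x) false) m
       (PySem.List.sorted a (fun x => x) false) 0).getD true

-- ===== PORT B =====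
def solve_alt (n : Int) (m : Int) (k : Int) (a : List Int) (b : List Int) : Bool :=
  if a.length > b.length then true
  else
    let sa := PySem.List.sorted a (fun x => x) false
    let sb := PySem.List.sorted b (fun x => x) false
    if (a.length : Int) > m then true
    else
      let c : Int := min m (b.length : Int)
      -- indices are in range under the guards, so pyGetD is exact for Python's b[c-t+i], a[i]
      (List.range a.length).any (fun i =>
        decide (PySem.List.pyGetD sb (c - (a.length : Int) + (i : Int)) 0 <
                PySem.List.pyGetD sa (i : Int) 0))

-- ===== PRECONDITION & SPEC =====
-- Pre_ restricts to the task's natural domain: it excludes negative m when len(a) ≤ len(b) (m counts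
-- usable elements of b, so a negative cap is malformed input; A returns False there, B returns True)
-- and the inputs with len(a) ≤ len(b) < m on which A raises IndexError (sorted a not matchable under
-- the whole of sorted b).
def Pre_solve (n : Int) (m : Int) (k : Int) (a : List Int) (b : List Int) : Prop :=
  (b.length : Int) < (a.length : Int) ∨
    (0 ≤ m ∧ (m ≤ (b.length : Int) ∨
      ∀ i : Nat, i < a.length →
        PySem.List.pyGetD (PySem.List.sorted a (fun x => x) false) (i : Int) 0 ≤
        PySem.List.pyGetD (PySem.List.sorted b (fun x => x) false)
          ((b.length : Int) - (a.length : Int) + (i : Int)) 0))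
instance (n : Int) (m : Int) (k : Int) (a : List Int) (b : List Int) : Decidable (Pre_solve n m k a b) := by unfold Pre_solve; infer_instance
def pvWitness_solve : Int × Int × Int × List Int × List Int := (0, 2, 0, [1], [1, 2])

def Spec_solve (n : Int) (m : Int) (k : Int) (a : List Int) (b : List Int) (out : Bool) : Prop := out = solve_alt n m k a b
instance (n : Int) (m : Int) (k : Int) (a : List Int) (b : List Int) (out : Bool) : Decidable (Spec_solve n m k a b out) := by unfold Spec_solve; infer_instance

-- ===== CLAIM (what is proved, stated in full; the proofs are below) =====
def Claim_equal_solve : Prop := ∀ (n : Int) (m : Int) (k : Int) (a : List Int) (b : List Int), Dom_solve n m k a b → Pre_solve n m k a b → Spec_solve n m k a b (solve n m k a b)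

-- ===== LEMMAS AND PROOFS =====

-- sorted-a paired against the suffix of sorted-b ending at position M (exclusive)
def SufCond (sa sb : List Int) (M : Int) : Prop :=
  ∀ i : Nat, i < sa.length →
    PySem.List.pyGetD sa (i : Int) 0 ≤ PySem.List.pyGetD sb (M - (sa.length : Int) + (i : Int)) 0

theorem while_spec (b : List Int) (m x : Int) : ∀ (j j' : Int), 0 ≤ j → j ≤ m →
    solveWhile b m x j = some j' →
    j ≤ j' ∧ j' ≤ m ∧ (j' < m → ∃ v, PySem.List.pyGet? b j' = some v ∧ x ≤ v) := by
  intro j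
  generalize hn : (m - j).toNat = fuel
  induction fuel generalizing j with
  | zero =>
    intro j' h0 hjm hw
    rw [solveWhile] at hw
    have hjm' : ¬ j < m := by omega
    simp [hjm'] at hw
    subst hw
    exact ⟨le_refl _, hjm, fun h => absurd h hjm'⟩
  | succ fuel ih =>
    intro j' h0 hjm hw
    rw [solveWhile] at hw
    by_cases hlt : j < m
    · simp only [hlt, dif_pos] at hw
      cases hg : PySem.List.pyGet? b j with
      | none => rw [hg] at hw; simp at hw
      | some v =>
        rw [hg] at hw
        by_cases hvx : v < x
        · simp only [hvx, if_pos] at hw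
          have := ih (j + 1) (by omega) j' (by omega) (by omega) hw
          exact ⟨by omega, this.2.1, this.2.2⟩
        · simp only [hvx, if_neg, not_false_iff] at hw
          cases hw
          exact ⟨le_refl _, by omega, fun _ => ⟨v, hg, by omega⟩⟩
    · simp [hlt] at hw
      subst hw
      exact ⟨le_refl _, hjm, fun h => absurd h hlt⟩

theorem while_total (b : List Int) (m x : Int) : ∀ (j : Int), 0 ≤ j → j ≤ m → m ≤ (b.length : Int) →
    ∃ j', solveWhile b m x j = some j' ∧ j ≤ j' ∧ j' ≤ m := by
  intro j
  generalize hn : (m - j).toNat = fuel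
  induction fuel generalizing j with
  | zero =>
    intro h0 hjm hm
    have hjm' : ¬ j < m := by omega
    rw [solveWhile]
    simp [hjm']
    omega
  | succ fuel ih =>
    intro h0 hjm hm
    by_cases hlt : j < m
    · have hg : PySem.List.pyGet? b j = some (b.get ⟨j.toNat, by omega⟩) := by
        rw [PySem.List.pyGet?_eq_some_getElem b h0 (by omega)]
        simp [List.get_eq_getElem]
      rw [solveWhile]
      simp only [hlt, dif_pos, hg]
      by_cases hvx : b.get ⟨j.toNat, by omega⟩ < x
      · simp only [hvx, if_pos]
        obtain ⟨j', hw, h1, h2⟩ := ih (j + 1) (by omega) (by omega) (by omega) hm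
        exact ⟨j', hw, by omega, h2⟩
      · simp only [hvx, if_neg, not_false_iff]
        exact ⟨j, rfl, le_refl _, by omega⟩
    · rw [solveWhile]
      simp [hlt]
      omega

theorem while_stop (b : List Int) (m x : Int) : ∀ (j i0 : Int), 0 ≤ j → j ≤ i0 → i0 < m →
    ∀ v0, PySem.List.pyGet? b i0 = some v0 → x ≤ v0 →
    ∃ j' v, solveWhile b m x j = some j' ∧ j ≤ j' ∧ j' ≤ i0 ∧
      PySem.List.pyGet? b j' = some v ∧ x ≤ v := by
  intro j i0
  generalize hn : (i0 - j).toNat = fuel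
  induction fuel generalizing j with
  | zero =>
    intro h0 hji him v0 hv hx
    have hji' : j = i0 := by omega
    subst hji'
    rw [solveWhile]
    simp only [him, dif_pos, hv]
    have hvx : ¬ v0 < x := by omega
    simp only [hvx, if_neg, not_false_iff]
    exact ⟨j, v0, rfl, le_refl _, le_refl _, hv, hx⟩
  | succ fuel ih =>
    intro h0 hji him v0 hv hx
    have hi0len : i0 < (b.length : Int) := by
      by_contra hc
      rw [(PySem.List.pyGet?_eq_none_iff b i0).2 (by unfold PySem.Raise.InRange; omega)] at hv
      simp at hv
    have hjlen : j < (b.length : Int) := by omega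
    have hg : PySem.List.pyGet? b j = some (b.get ⟨j.toNat, by omega⟩) := by
      rw [PySem.List.pyGet?_eq_some_getElem b h0 hjlen]
      simp [List.get_eq_getElem]
    have hjm : j < m := by omega
    rw [solveWhile]
    simp only [hjm, dif_pos, hg]
    by_cases hvx : b.get ⟨j.toNat, by omega⟩ < x
    · simp only [hvx, if_pos]
      have hne : j ≠ i0 := by
        intro he; subst he
        rw [PySem.List.pyGet?_eq_some_getElem b h0 hjlen] at hv
        simp [List.get_eq_getElem] at hg hv ⊢
        omega
      obtain ⟨j', v, hw, h1, h2, h3, h4⟩ := ih (j + 1) (by omega) (by omega) (by omega) him v0 hv hx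
      exact ⟨j', v, hw, by omega, h2, h3, h4⟩
    · simp only [hvx, if_neg, not_false_iff]
      exact ⟨j, _, rfl, le_refl _, by omega, hg, by omega⟩

theorem loop_small (b : List Int) (m : Int) : ∀ (l : List Int) (j : Int), 0 ≤ j → j ≤ m →
    m ≤ (b.length : Int) → m - j < (l.length : Int) → solveLoop b m l j = some true := by
  intro l
  induction l with
  | nil => intro j h0 hjm hm hlen; simp at hlen; omega
  | cons x rest ih =>
    intro j h0 hjm hm hlen
    obtain ⟨j', hw, hj1, hj2⟩ := while_total b m x j h0 hjm hm
    simp only [solveLoop, hw]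
    by_cases he : j' = m
    · simp [he]
    · rw [if_neg he]
      apply ih (j' + 1) (by omega) (by omega) hm
      simp only [List.length_cons] at hlen
      push_cast at hlen ⊢
      omega

theorem loop_total (b : List Int) (m : Int) : ∀ (l : List Int) (j : Int), 0 ≤ j → j ≤ m →
    m ≤ (b.length : Int) → ∃ r, solveLoop b m l j = some r := by
  intro l
  induction l with
  | nil => intro j _ _ _; exact ⟨false, rfl⟩
  | cons x rest ih =>
    intro j h0 hjm hm
    obtain ⟨j', hw, hj1, hj2⟩ := while_total b m x j h0 hjm hm
    by_cases he : j' = m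
    · exact ⟨true, by simp only [solveLoop, hw]; simp [he]⟩
    · obtain ⟨r, hr⟩ := ih (j' + 1) (by omega) (by omega) hm
      exact ⟨r, by simp only [solveLoop, hw]; rw [if_neg he]; exact hr⟩

-- direction 1, used only when m ≤ |sb| (so min m |sb| = m)
theorem loop_false_sc (sb : List Int) (m : Int) (hb : sb.Pairwise (· ≤ ·))
    (hm : m ≤ (sb.length : Int)) :
    ∀ (l : List Int) (j : Int), 0 ≤ j → j ≤ m → solveLoop sb m l j = some false →
    (l.length : Int) ≤ m - j ∧ SufCond l sb m := by
  intro l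
  induction l with
  | nil =>
    intro j h0 hjm _
    refine ⟨by simp; omega, ?_⟩
    intro i hi; simp at hi
  | cons x rest ih =>
    intro j h0 hjm hloop
    cases hw : solveWhile sb m x j with
    | none => simp only [solveLoop, hw] at hloop; simp at hloop
    | some j' =>
      simp only [solveLoop, hw] at hloop
      by_cases he : j' = m
      · simp [he] at hloop
      · rw [if_neg he] at hloop
        obtain ⟨hjj', hj'm, hchar⟩ := while_spec sb m x j j' h0 hjm hw
        have hj'lt : j' < m := by omega
        obtain ⟨v, hv, hxv⟩ := hchar hj'lt
        have hj'len : j' < (sb.length : Int) := by omega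
        have hv' : v = sb[j'.toNat]'(by omega) := by
          rw [PySem.List.pyGet?_eq_some_getElem sb (by omega) hj'len] at hv
          exact (Option.some_inj.1 hv).symm
        obtain ⟨hlen, hsc⟩ := ih (j' + 1) (by omega) (by omega) hloop
        have hlen' : ((x :: rest).length : Int) ≤ m - j := by
          simp only [List.length_cons]; push_cast; push_cast at hlen; omega
        refine ⟨hlen', ?_⟩
        intro i hi
        cases i with
        | zero =>
          -- x ≤ sb[m - |l|]
          have hq0 : (0 : Int) ≤ m - ((x :: rest).length : Int) := by
            push_cast at hlen' ⊢; omega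
          have hqlen : m - ((x :: rest).length : Int) + ((0 : Nat) : Int) < (sb.length : Int) := by
            push_cast; push_cast at hq0; omega
          rw [PySem.List.pyGetD_eq_getElem sb 0 (by push_cast; push_cast at hq0; omega) hqlen]
          have hlhs : PySem.List.pyGetD (x :: rest) ((0 : Nat) : Int) 0 = x := by
            rw [PySem.List.pyGetD_natCast]; rfl
          rw [hlhs]
          have hj'q : j'.toNat ≤ (m - ((x :: rest).length : Int) + ((0 : Nat) : Int)).toNat := by
            simp only [List.length_cons] at hlen ⊢
            push_cast at hlen ⊢
            omega
          have hmono : sb[j'.toNat]'(by omega) ≤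
              sb[(m - ((x :: rest).length : Int) + ((0 : Nat) : Int)).toNat]'(by
                omega) := by
            rcases Nat.lt_or_ge j'.toNat (m - ((x :: rest).length : Int) + ((0 : Nat) : Int)).toNat with hlt | hge
            · exact List.pairwise_iff_getElem.1 hb _ _ (by omega) (by omega) hlt
            · have : j'.toNat = (m - ((x :: rest).length : Int) + ((0 : Nat) : Int)).toNat := by omega
              simp [this]
          calc x ≤ v := hxv
            _ = sb[j'.toNat]'(by omega) := hv'
            _ ≤ _ := hmono
        | succ i =>
          have hi' : i < rest.length := by simpa using hi
          have := hsc i hi'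
          have hlhs : PySem.List.pyGetD (x :: rest) ((i + 1 : Nat) : Int) 0 =
              PySem.List.pyGetD rest ((i : Nat) : Int) 0 := by
            rw [PySem.List.pyGetD_natCast, PySem.List.pyGetD_natCast]
            simp [List.getD]
          rw [hlhs]
          have hidx : m - (((x :: rest).length : Nat) : Int) + ((i + 1 : Nat) : Int) =
              m - ((rest.length : Nat) : Int) + ((i : Nat) : Int) := by
            simp only [List.length_cons]; push_cast; ring
          rw [hidx]
          exact this

theorem sc_loop_false (sb : List Int) (m : Int) :
    ∀ (l : List Int) (j : Int), 0 ≤ j → (l.length : Int) ≤ min m (sb.length : Int) - j →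
    SufCond l sb (min m (sb.length : Int)) → solveLoop sb m l j = some false := by
  intro l
  induction l with
  | nil => intro j _ _ _; rfl
  | cons x rest ih =>
    intro j h0 hlen hsc
    have hM1 : min m (sb.length : Int) ≤ m := min_le_left _ _
    have hM2 : min m (sb.length : Int) ≤ (sb.length : Int) := min_le_right _ _
    have hlen' : j + ((rest.length : Int) + 1) ≤ min m (sb.length : Int) := by
      simp only [List.length_cons] at hlen; push_cast at hlen; omega
    -- the target b-slot for x
    have hsc0 := hsc 0 (by simp)
    have hidx0 : min m (sb.length : Int) - (((x :: rest).length : Nat) : Int) + ((0 : Nat) : Int) =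
        min m (sb.length : Int) - (rest.length : Int) - 1 := by
      simp only [List.length_cons]; push_cast; ring
    rw [hidx0] at hsc0
    have hlhs0 : PySem.List.pyGetD (x :: rest) ((0 : Nat) : Int) 0 = x := by
      rw [PySem.List.pyGetD_natCast]; rfl
    rw [hlhs0] at hsc0
    have hi0pos : 0 ≤ min m (sb.length : Int) - (rest.length : Int) - 1 := by omega
    have hi0len : min m (sb.length : Int) - (rest.length : Int) - 1 < (sb.length : Int) := by omega
    rw [PySem.List.pyGetD_eq_getElem sb 0 hi0pos hi0len] at hsc0
    have hv0 : PySem.List.pyGet? sb (min m (sb.length : Int) - (rest.length : Int) - 1) =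
        some (sb[(min m (sb.length : Int) - (rest.length : Int) - 1).toNat]'(by omega)) :=
      PySem.List.pyGet?_eq_some_getElem sb hi0pos hi0len
    obtain ⟨j', v, hw, hjj', hj'i0, hgv, hxv⟩ :=
      while_stop sb m x j (min m (sb.length : Int) - (rest.length : Int) - 1) h0 (by omega)
        (by omega) _ hv0 hsc0
    simp only [solveLoop, hw]
    rw [if_neg (by omega : ¬ j' = m)]
    apply ih (j' + 1) (by omega) (by push_cast; omega)
    intro i hi
    have := hsc (i + 1) (by simp; omega)
    have hlhs : PySem.List.pyGetD (x :: rest) ((i + 1 : Nat) : Int) 0 =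
        PySem.List.pyGetD rest ((i : Nat) : Int) 0 := by
      rw [PySem.List.pyGetD_natCast, PySem.List.pyGetD_natCast]
      simp [List.getD]
    rw [hlhs] at this
    have hidx : min m (sb.length : Int) - (((x :: rest).length : Nat) : Int) + ((i + 1 : Nat) : Int) =
        min m (sb.length : Int) - ((rest.length : Nat) : Int) + ((i : Nat) : Int) := by
      simp only [List.length_cons]; push_cast; ring
    rw [hidx] at this
    exact this

-- ===== VERDICT (by name: the statement is the Claim_ definition above) =====
theorem solve_spec : Claim_equal_solve := by
  intro n m k a b _ hpre
  unfold Spec_solve solve solve_alt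
  by_cases hab : a.length > b.length
  · simp only [if_pos hab]
  · simp only [if_neg hab]
    set sa := PySem.List.sorted a (fun x => x) false with hsa
    set sb := PySem.List.sorted b (fun x => x) false with hsb
    have hla : sa.length = a.length := PySem.List.length_sorted a _ false
    have hlb : sb.length = b.length := PySem.List.length_sorted b _ false
    have hpb : sb.Pairwise (· ≤ ·) := by
      simpa using PySem.List.sorted_pairwise b (fun x => x)
    have h0m : 0 ≤ m := by
      rcases hpre with h | ⟨h, _⟩
      · omega
      · exact h
    by_cases htm : (a.length : Int) > m
    · rw [if_pos htm]
      rw [loop_small sb m sa 0 (le_refl 0) h0m (by omega) (by rw [hla]; omega)]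
      rfl
    · rw [if_neg htm]
      by_cases hsc : SufCond sa sb (min m (sb.length : Int))
      · have hBfalse : ((List.range a.length).any fun i =>
            decide (PySem.List.pyGetD sb (min m (b.length : Int) - (a.length : Int) + (i : Int)) 0 <
              PySem.List.pyGetD sa ((i : Nat) : Int) 0)) = false := by
          refine List.any_eq_false.2 ?_
          intro i hi
          rw [List.mem_range] at hi
          simp only [decide_eq_true_eq, not_lt]
          have h := hsc i (by omega)
          simpa only [hla, hlb] using h
        rw [sc_loop_false sb m sa 0 (le_refl 0) (by omega) hsc, hBfalse]
        rfl
      · -- B is true; show A's loop yields true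
        have hBtrue : (List.range a.length).any (fun i =>
            decide (PySem.List.pyGetD sb (min m (b.length : Int) - (a.length : Int) + (i : Int)) 0 <
              PySem.List.pyGetD sa ((i : Nat) : Int) 0)) = true := by
          unfold SufCond at hsc
          push Not at hsc
          obtain ⟨i, hi, hlt⟩ := hsc
          refine List.any_eq_true.2 ⟨i, List.mem_range.2 (by omega), ?_⟩
          simp only [decide_eq_true_eq]
          simpa only [hla, hlb] using hlt
        rw [hBtrue]
        by_cases hmb : m ≤ (b.length : Int)
        · obtain ⟨r, hr⟩ := loop_total sb m sa 0 (le_refl 0) h0m (by omega)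
          cases r with
          | true => rw [hr]; rfl
          | false =>
            exfalso
            have h := (loop_false_sc sb m hpb (by omega) sa 0 (le_refl 0) h0m hr).2
            apply hsc
            have hmin : min m (sb.length : Int) = m := min_eq_left (by omega)
            rw [hmin]
            exact h
        · exfalso
          rcases hpre with h | ⟨_, h | h⟩
          · omega
          · omega
          · apply hsc
            intro i hi
            have h' := h i (by omega)
            rw [hla, hlb, min_eq_right (by omega : (b.length : Int) ≤ m)]
            exact h'
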